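-- pv_equiv track=rewrite | github.com/0xble/OpenViking | openviking/source/session_logs.py | _strip_edge_tokens
-- ===== SOURCE A (Python) =====
-- def _strip_edge_tokens(tokens: tuple[str, ...], removable: set[str]) -> tuple[str, ...]:
--     start = 0
--     end = len(tokens)
--     while start < end and tokens[start] in removable:
--         start += 1
--     while end > start and tokens[end - 1] in removable:
--         end -= 1
--     return tokens[start:end]
-- ===== SOURCE B (Python) =====
-- def _strip_edge_tokens(tokens: tuple[str, ...], removable: set[str]) -> tuple[str, ...]:
--     keep = [i for i, t in enumerate(tokens) if t not in removable]
--     if not keep: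
--         return tokens[0:0]
--     return tokens[keep[0]:keep[-1] + 1]
-- ===== Notes on version B (the rewrite author's own statement) =====
-- stated objective: alternative
-- what changed: B makes one full forward pass collecting the indices of all non-removable tokens, then slices between the first and last kept index, instead of A's two edge-trimming pointer loops.
import Mathlib
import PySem

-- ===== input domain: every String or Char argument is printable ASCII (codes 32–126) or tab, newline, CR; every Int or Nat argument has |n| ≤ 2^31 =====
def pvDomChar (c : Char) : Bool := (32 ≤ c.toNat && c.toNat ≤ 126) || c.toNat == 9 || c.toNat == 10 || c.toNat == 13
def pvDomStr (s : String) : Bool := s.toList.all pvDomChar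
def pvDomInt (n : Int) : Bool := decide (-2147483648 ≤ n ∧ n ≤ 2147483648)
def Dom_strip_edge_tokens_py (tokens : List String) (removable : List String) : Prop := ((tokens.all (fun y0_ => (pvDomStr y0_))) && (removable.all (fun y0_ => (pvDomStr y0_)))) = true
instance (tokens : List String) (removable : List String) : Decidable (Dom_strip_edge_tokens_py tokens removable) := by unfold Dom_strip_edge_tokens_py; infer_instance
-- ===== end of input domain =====

-- B replaces A's two edge-trimming pointer loops by one full forward pass that collects
-- the indices of all non-removable tokens and slices between the first and last of them
-- (objective: alternative decomposition, same cost).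

-- ===== PORT A =====
-- first while loop: `while start < end and tokens[start] in removable: start += 1`
-- (the guard start < end ≤ len(tokens) keeps the index in range, so `getD` is exact here)
def aStartLoop (tokens : List String) (removable : List String) (start endN : Nat) : Nat :=
  if h : start < endN ∧ tokens.getD start "" ∈ removable then
    aStartLoop tokens removable (start + 1) endN
  else start
termination_by endN - start
decreasing_by omega

-- second while loop: `while end > start and tokens[end - 1] in removable: end -= 1`
def aEndLoop (tokens : List String) (removable : List String) (start endN : Nat) : Nat :=
  if h : endN > start ∧ tokens.getD (endN - 1) "" ∈ removable then
    aEndLoop tokens removable start (endN - 1)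
  else endN
termination_by endN
decreasing_by omega

def strip_edge_tokens_py (tokens : List String) (removable : List String) : List String :=
  let start := aStartLoop tokens removable 0 tokens.length
  let e := aEndLoop tokens removable start tokens.length
  PySem.List.slice tokens (some (start : Int)) (some (e : Int))

-- ===== PORT B =====
-- `keep = [i for i, t in enumerate(tokens) if t not in removable]` as a structural pass with the counter
def collectKeep (removable : List String) : List String → Nat → List Nat
  | [], _ => []
  | t :: rest, i =>
      if t ∈ removable then collectKeep removable rest (i + 1)
      else i :: collectKeep removable rest (i + 1)

def strip_edge_tokens_py_alt (tokens : List String) (removable : List String) : List String :=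
  match collectKeep removable tokens 0 with
  | [] => PySem.List.slice tokens (some 0) (some 0)
  | k0 :: rest =>
      PySem.List.slice tokens (some (k0 : Int))
        (some (((k0 :: rest).getLast (List.cons_ne_nil _ _) : Int) + 1))

-- ===== PRECONDITION & SPEC =====
def Spec_strip_edge_tokens_py (tokens : List String) (removable : List String) (out : List String) : Prop := out = strip_edge_tokens_py_alt tokens removable
instance (tokens : List String) (removable : List String) (out : List String) : Decidable (Spec_strip_edge_tokens_py tokens removable out) := by unfold Spec_strip_edge_tokens_py; infer_instance

-- ===== CLAIM (what is proved, stated in full; the proofs are below) =====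
def Claim_equal_strip_edge_tokens_py : Prop := ∀ (tokens : List String) (removable : List String), Dom_strip_edge_tokens_py tokens removable → Spec_strip_edge_tokens_py tokens removable (strip_edge_tokens_py tokens removable)

-- ===== LEMMAS AND PROOFS =====

-- (length of a takeWhile prefix is at most the list length)
theorem len_takeWhile_le {α : Type} (p : α → Bool) (l : List α) :
    (l.takeWhile p).length ≤ l.length :=
  (List.takeWhile_sublist p).length_le

theorem drop_len_takeWhile {α : Type} (p : α → Bool) (l : List α) :
    l.drop (l.takeWhile p).length = l.dropWhile p := by
  have h : (l.takeWhile p ++ l.dropWhile p).drop (l.takeWhile p).length = l.dropWhile p :=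
    List.drop_left
  rwa [List.takeWhile_append_dropWhile] at h

-- A's first loop computes start + (length of the removable prefix of tokens.drop start).
theorem aStartLoop_eq (l rm : List String) :
    ∀ (k start : Nat), l.length - start ≤ k → start ≤ l.length →
      aStartLoop l rm start l.length
        = start + ((l.drop start).takeWhile (fun t => decide (t ∈ rm))).length := by
  intro k
  induction k with
  | zero =>
      intro start hk hle
      have hs : start = l.length := by omega
      rw [aStartLoop, dif_neg (by omega)]
      simp [hs]
  | succ k ih =>
      intro start hk hle
      rw [aStartLoop]
      split_ifs with h
      · obtain ⟨hlt, hmem⟩ := h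
        have hget : l.getD start "" = l[start] := List.getD_eq_getElem l "" hlt
        have hdrop : l[start] :: l.drop (start + 1) = l.drop start :=
          List.getElem_cons_drop ..
        rw [ih (start + 1) (by omega) (by omega)]
        rw [← hdrop, List.takeWhile_cons]
        have hdec : decide (l[start] ∈ rm) = true := by
          rw [hget] at hmem; simpa using hmem
        rw [hdec]
        simp
        omega
      · rcases Nat.lt_or_ge start l.length with hlt | hge
        · have hget : l.getD start "" = l[start] := List.getD_eq_getElem l "" hlt
          have hnot : ¬ l[start] ∈ rm := by
            intro hm; exact h ⟨hlt, by rw [hget]; exact hm⟩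
          have hdrop : l[start] :: l.drop (start + 1) = l.drop start :=
            List.getElem_cons_drop ..
          rw [← hdrop, List.takeWhile_cons]
          simp [hnot]
        · have hs : start = l.length := by omega
          simp [hs]

-- A's second loop computes e minus (length of the removable suffix of (l.take e).drop s).
theorem aEndLoop_eq (l rm : List String) :
    ∀ (k s e : Nat), e - s ≤ k → s ≤ e → e ≤ l.length →
      aEndLoop l rm s e
        = e - (((l.take e).drop s).reverse.takeWhile (fun t => decide (t ∈ rm))).length := by
  intro k
  induction k with
  | zero =>
      intro s e hk hse hel
      have hs : s = e := by omega
      have hnil : (l.take e).drop s = [] := by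
        apply List.drop_eq_nil_of_le
        simp [hs]
      rw [aEndLoop, dif_neg (by omega), hnil]
      simp
  | succ k ih =>
      intro s e hk hse hel
      rcases Nat.eq_or_lt_of_le hse with hs | hlt
      · have hnil : (l.take e).drop s = [] := by
          apply List.drop_eq_nil_of_le
          simp [hs]
        rw [aEndLoop, dif_neg (by omega), hnil]
        simp
      · obtain ⟨e', rfl⟩ : ∃ e', e = e' + 1 := ⟨e - 1, by omega⟩
        have he1 : e' < l.length := by omega
        have htake : l.take (e' + 1) = l.take e' ++ [l[e']] := by
          rw [List.take_succ]
          simp [List.getElem?_eq_getElem he1]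
        have hlen : s ≤ (l.take e').length := by
          simp [List.length_take]; omega
        have hdecomp : ((l.take (e' + 1)).drop s).reverse
            = l[e'] :: ((l.take e').drop s).reverse := by
          rw [htake, List.drop_append_of_le_length hlen]
          simp
        have hget : l.getD (e' + 1 - 1) "" = l[e'] := by
          simpa using List.getD_eq_getElem l "" he1
        rw [aEndLoop]
        split_ifs with h
        · obtain ⟨-, hmem⟩ := h
          rw [hget] at hmem
          have hih := ih s e' (by omega) (by omega) (by omega)
          simp only [Nat.add_sub_cancel]
          rw [hih, hdecomp, List.takeWhile_cons]
          have hdec : decide (l[e'] ∈ rm) = true := by simpa using hmem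
          rw [hdec]
          have hb : (((l.take e').drop s).reverse.takeWhile
              (fun t => decide (t ∈ rm))).length ≤ e' - s := by
            calc _ ≤ ((l.take e').drop s).reverse.length :=
                    len_takeWhile_le _ _
              _ ≤ e' - s := by simp [List.length_take]; omega
          simp
        · have hnot : ¬ l[e'] ∈ rm := by
            intro hm; exact h ⟨hlt, by rw [hget]; exact hm⟩
          rw [hdecomp, List.takeWhile_cons]
          simp [hnot]

-- collectKeep is empty iff every token is removable
theorem collectKeep_eq_nil_iff (rm : List String) (l : List String) :
    ∀ i, collectKeep rm l i = [] ↔ ∀ t ∈ l, t ∈ rm := by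
  induction l with
  | nil => intro i; simp [collectKeep]
  | cons t rest ih =>
      intro i
      by_cases h : t ∈ rm
      · simp [collectKeep, h, ih (i + 1)]
      · simp [collectKeep, h]

-- first kept index = i + length of the removable prefix
theorem collectKeep_head (rm : List String) (l : List String) :
    ∀ i k0 rest, collectKeep rm l i = k0 :: rest →
      k0 = i + (l.takeWhile (fun t => decide (t ∈ rm))).length := by
  induction l with
  | nil => intro i k0 rest h; simp [collectKeep] at h
  | cons t tl ih =>
      intro i k0 rest h
      by_cases hm : t ∈ rm
      · rw [collectKeep, if_pos hm] at h
        have := ih (i + 1) k0 rest h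
        rw [List.takeWhile_cons]
        simp [hm]
        omega
      · rw [collectKeep, if_neg hm] at h
        rw [List.takeWhile_cons]
        simp [hm]
        exact (List.cons_eq_cons.mp h).1.symm

theorem collectKeep_append (rm : List String) (xs : List String) (t : String) :
    ∀ i, collectKeep rm (xs ++ [t]) i
      = collectKeep rm xs i ++ (if t ∈ rm then [] else [i + xs.length]) := by
  induction xs with
  | nil => intro i; by_cases h : t ∈ rm <;> simp [collectKeep, h]
  | cons x xl ih =>
      intro i
      by_cases hx : x ∈ rm
      · simp only [List.cons_append, collectKeep, if_pos hx, ih (i + 1)]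
        by_cases h : t ∈ rm <;> simp [h] <;> ring_nf
      · simp only [List.cons_append, collectKeep, if_neg hx, ih (i + 1)]
        by_cases h : t ∈ rm <;> simp [h] <;> ring_nf

-- last kept index = i + (length − removable suffix length − 1)
theorem collectKeep_getLast (rm : List String) (l : List String) :
    ∀ i, collectKeep rm l i ≠ [] →
      (collectKeep rm l i).getLast? =
        some (i + (l.length - (l.reverse.takeWhile (fun t => decide (t ∈ rm))).length - 1)) := by
  induction l using List.reverseRecOn with
  | nil => intro i h; simp [collectKeep] at h
  | append_singleton xs t ih =>
      intro i h
      rw [collectKeep_append] at h ⊢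
      by_cases hm : t ∈ rm
      · rw [if_pos hm] at h ⊢
        simp only [List.append_nil] at h ⊢
        rw [ih i h]
        have hne : ∃ u ∈ xs, ¬ u ∈ rm := by
          by_contra hall
          push_neg at hall
          exact h ((collectKeep_eq_nil_iff rm xs i).mpr hall)
        obtain ⟨u, hu, hun⟩ := hne
        have hxs : (xs.reverse.takeWhile (fun t => decide (t ∈ rm))).length < xs.length := by
          rcases Nat.lt_or_ge (xs.reverse.takeWhile (fun t => decide (t ∈ rm))).length
              xs.length with hlt | hge
          · exact hlt
          · exfalso
            have hself : xs.reverse.takeWhile (fun t => decide (t ∈ rm)) = xs.reverse := by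
              apply (List.takeWhile_sublist _).eq_of_length_le
              simpa using hge
            have hmemu : u ∈ xs.reverse.takeWhile (fun t => decide (t ∈ rm)) := by
              rw [hself]; simpa using hu
            have := List.mem_takeWhile_imp hmemu
            simp at this
            exact hun this
        rw [List.reverse_append]
        simp only [List.reverse_singleton, List.singleton_append, List.takeWhile_cons]
        have hdec : decide (t ∈ rm) = true := by simpa using hm
        rw [hdec]
        simp
      · rw [if_neg hm]
        rw [List.getLast?_append_of_ne_nil _ (by simp)]
        rw [List.reverse_append]
        simp only [List.reverse_singleton, List.singleton_append, List.takeWhile_cons]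
        have hdec : decide (t ∈ rm) = false := by simpa using hm
        rw [hdec]
        simp

-- the removable suffix of l equals the removable suffix of l with its removable prefix
-- dropped, provided some token is kept
theorem suffix_takeWhile_drop (rm : List String) (l : List String)
    (hne : ∃ u ∈ l, ¬ u ∈ rm) :
    ((l.drop (l.takeWhile (fun t => decide (t ∈ rm))).length).reverse.takeWhile
        (fun t => decide (t ∈ rm)))
      = l.reverse.takeWhile (fun t => decide (t ∈ rm)) := by
  set p : String → Bool := fun t => decide (t ∈ rm) with hp
  rw [drop_len_takeWhile]
  have hrev : l.reverse = (l.dropWhile p).reverse ++ (l.takeWhile p).reverse := by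
    conv_lhs => rw [← List.takeWhile_append_dropWhile (p := p) (l := l)]
    simp
  rw [hrev, List.takeWhile_append]
  have hnd : l.dropWhile p ≠ [] := by
    intro hnil
    obtain ⟨u, hu, hun⟩ := hne
    have hall : ∀ v ∈ l, p v := by
      intro v hv
      have hsplit := List.takeWhile_append_dropWhile (p := p) (l := l)
      rw [hnil, List.append_nil] at hsplit
      have hv' : v ∈ l.takeWhile p := by rw [hsplit]; exact hv
      exact List.mem_takeWhile_imp hv'
    have := hall u hu
    simp [hp] at this
    exact hun this
  have hhead : p ((l.dropWhile p).head hnd) = false := List.head_dropWhile_not p hnd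
  have hlast : ((l.dropWhile p).reverse.takeWhile p).length ≠ (l.dropWhile p).reverse.length := by
    intro heq
    have hself : (l.dropWhile p).reverse.takeWhile p = (l.dropWhile p).reverse :=
      (List.takeWhile_sublist _).eq_of_length_le (le_of_eq heq.symm)
    have hmem : (l.dropWhile p).head hnd ∈ (l.dropWhile p).reverse.takeWhile p := by
      rw [hself]; simp [List.head_mem]
    have := List.mem_takeWhile_imp hmem
    rw [hhead] at this
    exact Bool.false_ne_true this
  rw [if_neg hlast]

-- ===== VERDICT (by name: the statement is the Claim_ definition above) =====
theorem strip_edge_tokens_py_spec : Claim_equal_strip_edge_tokens_py := by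
  unfold Claim_equal_strip_edge_tokens_py Spec_strip_edge_tokens_py
  intro l rm _
  have hstart : aStartLoop l rm 0 l.length
      = (l.takeWhile (fun t => decide (t ∈ rm))).length := by
    have := aStartLoop_eq l rm l.length 0 (by omega) (by omega)
    simpa using this
  have hs0le : (l.takeWhile (fun t => decide (t ∈ rm))).length ≤ l.length :=
    len_takeWhile_le _ _
  have hend : aEndLoop l rm (l.takeWhile (fun t => decide (t ∈ rm))).length l.length
      = l.length - ((l.drop (l.takeWhile (fun t => decide (t ∈ rm))).length).reverse.takeWhile
          (fun t => decide (t ∈ rm))).length := by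
    have := aEndLoop_eq l rm l.length (l.takeWhile (fun t => decide (t ∈ rm))).length l.length
      (by omega) hs0le (le_refl _)
    simpa using this
  simp only [strip_edge_tokens_py, strip_edge_tokens_py_alt]
  rcases hcase : collectKeep rm l 0 with _ | ⟨k0, rest⟩
  · -- everything removable: A returns the empty slice, and so does B
    have hall : ∀ t ∈ l, t ∈ rm := (collectKeep_eq_nil_iff rm l 0).mp hcase
    have htw : l.takeWhile (fun t => decide (t ∈ rm)) = l := by
      apply List.takeWhile_eq_self_iff.mpr
      intro t ht; simpa using hall t ht
    have hs0' : (l.takeWhile (fun t => decide (t ∈ rm))).length = l.length := by rw [htw]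
    have hdrop : l.drop l.length = ([] : List String) := List.drop_length
    rw [hstart, hend, hs0', hdrop]
    simp [PySem.List.slice_natCast, PySem.List.slice]
  · -- some token kept
    have hk0 : k0 = (l.takeWhile (fun t => decide (t ∈ rm))).length := by
      have := collectKeep_head rm l 0 k0 rest hcase
      simpa using this
    have hne : ∃ u ∈ l, ¬ u ∈ rm := by
      by_contra hall
      push_neg at hall
      rw [(collectKeep_eq_nil_iff rm l 0).mpr hall] at hcase
      simp at hcase
    have hlastq := collectKeep_getLast rm l 0 (by rw [hcase]; simp)
    rw [hcase] at hlastq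
    have hlast : (k0 :: rest).getLast (List.cons_ne_nil _ _)
        = l.length - (l.reverse.takeWhile (fun t => decide (t ∈ rm))).length - 1 := by
      rw [List.getLast?_eq_some_getLast (List.cons_ne_nil _ _)] at hlastq
      simpa using Option.some.inj hlastq
    have hsuffix := suffix_takeWhile_drop rm l hne
    have hm : (l.reverse.takeWhile (fun t => decide (t ∈ rm))).length < l.length := by
      rcases Nat.lt_or_ge (l.reverse.takeWhile (fun t => decide (t ∈ rm))).length
          l.reverse.length with hlt | hge
      · simpa using hlt
      · exfalso
        have hself : l.reverse.takeWhile (fun t => decide (t ∈ rm)) = l.reverse :=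
          (List.takeWhile_sublist _).eq_of_length_le hge
        obtain ⟨u, hu, hun⟩ := hne
        have hmemu : u ∈ l.reverse.takeWhile (fun t => decide (t ∈ rm)) := by
          rw [hself]; simpa using hu
        have := List.mem_takeWhile_imp hmemu
        simp at this
        exact hun this
    rw [hstart, hend, hsuffix, ← hk0]
    simp only [hlast]
    congr 2
    omega
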